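-- pv_equiv track=rewrite | github.com/SansarSharma/PythonPracticing | pythonicCode/enumerate/main.py | get_dist_between_sevens
-- ===== SOURCE A (Python) =====
-- from typing import List
--
-- def get_dist_between_sevens(nums: List[int]) -> int:
--     arr: list[int] = []
--
--     for index, value in enumerate(nums):
--         if (value == 7):
--             arr.append(index)
--
--             if(len(arr) == 2):
--                 return (arr[1]-arr[0])
--     return -1
-- ===== SOURCE B (Python) =====
-- def get_dist_between_sevens(nums):
--     ans = -1
--     gap = None  # steps taken since the most recent 7 while scanning right-to-left
--     for v in reversed(nums):
--         if gap is not None: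
--             gap += 1
--         if v == 7:
--             if gap is not None:
--                 ans = gap
--             gap = 0
--     return ans
-- ===== Notes on version B (the rewrite author's own statement) =====
-- stated objective: alternative
-- what changed: Instead of a forward enumerate loop that accumulates matched indices and returns early, B scans the list back-to-front with no indices at all, maintaining a running step counter since the most recent 7 and overwriting the answer at each pair so the leftmost pair wins.
import Mathlib
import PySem

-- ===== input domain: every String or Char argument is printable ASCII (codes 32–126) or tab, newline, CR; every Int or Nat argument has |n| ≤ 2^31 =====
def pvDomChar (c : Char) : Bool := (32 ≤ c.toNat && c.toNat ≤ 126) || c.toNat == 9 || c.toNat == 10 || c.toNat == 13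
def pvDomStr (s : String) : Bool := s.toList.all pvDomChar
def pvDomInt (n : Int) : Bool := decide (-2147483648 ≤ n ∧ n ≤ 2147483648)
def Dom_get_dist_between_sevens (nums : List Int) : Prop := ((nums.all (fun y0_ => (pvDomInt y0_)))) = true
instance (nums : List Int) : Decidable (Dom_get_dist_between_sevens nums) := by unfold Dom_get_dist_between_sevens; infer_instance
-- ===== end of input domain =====

-- B replaces A's forward enumerate loop (accumulating matched indices, early return)
-- with an index-free backward scan keeping a step counter since the most recent 7;
-- same return value, no side effects.

-- ===== PORT A =====
-- the Python for-loop over enumerate(nums) with accumulator list `arr`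
def pvLoopA : List Int → Int → List Int → Int
  | [], _, _ => -1
  | v :: rest, idx, arr =>
    if v == 7 then
      let arr' := arr ++ [idx]
      if arr'.length == 2 then
        -- arr'[1] - arr'[0]; both in range since arr'.length = 2
        (arr'.getD 1 0) - (arr'.getD 0 0)
      else pvLoopA rest (idx + 1) arr'
    else pvLoopA rest (idx + 1) arr

def get_dist_between_sevens (nums : List Int) : Int := pvLoopA nums 0 []

-- ===== PORT B =====
-- one step of Source B's loop body: increment gap if set, then on v == 7 record gap
-- as the answer (when set) and reset gap to 0
def pvStepB (st : Int × Option Nat) (v : Int) : Int × Option Nat :=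
  let gap1 : Option Nat := st.2.map (· + 1)
  if v == 7 then
    ((match gap1 with | some g => (g : Int) | none => st.1), some 0)
  else (st.1, gap1)

-- `for v in reversed(nums)` with state (ans, gap)
def pvLoopB : List Int → Int × Option Nat → Int × Option Nat
  | [], st => st
  | v :: rest, st => pvLoopB rest (pvStepB st v)

def get_dist_between_sevens_alt (nums : List Int) : Int :=
  (pvLoopB nums.reverse (-1, none)).1

-- ===== PRECONDITION & SPEC =====
def Spec_get_dist_between_sevens (nums : List Int) (out : Int) : Prop := out = get_dist_between_sevens_alt nums
instance (nums : List Int) (out : Int) : Decidable (Spec_get_dist_between_sevens nums out) := by unfold Spec_get_dist_between_sevens; infer_instance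

-- ===== CLAIM =====
def Claim_equal_get_dist_between_sevens : Prop := ∀ (nums : List Int), Dom_get_dist_between_sevens nums → Spec_get_dist_between_sevens nums (get_dist_between_sevens nums)

-- ===== LEMMAS AND PROOFS =====

-- A's loop with one recorded index i: result is (absolute index of next 7) minus i
theorem pvLoopA_one (l : List Int) (idx i : Int) :
    pvLoopA l idx [i] =
      match PySem.List.index? l 7 with
      | none => -1
      | some j => (idx + j) - i := by
  induction l generalizing idx with
  | nil => simp [pvLoopA, PySem.List.index?]
  | cons v rest ih =>
    by_cases hv : v = 7
    · subst hv
      rw [PySem.List.index?_cons_self]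
      simp [pvLoopA]
    · rw [PySem.List.index?_cons_of_ne rest hv]
      simp only [pvLoopA]
      rw [if_neg (by simp [hv])]
      rw [ih (idx + 1)]
      cases PySem.List.index? rest 7 with
      | none => rfl
      | some j => simp only [Option.map_some]; push_cast; ring

-- A's loop with empty accumulator: characterised by the first two sevens
theorem pvLoopA_empty (l : List Int) (idx : Int) :
    pvLoopA l idx [] =
      match PySem.List.index? l 7 with
      | none => -1
      | some j =>
        match PySem.List.index? (l.drop (j + 1)) 7 with
        | none => -1
        | some k => (k : Int) + 1 := by
  induction l generalizing idx with
  | nil => simp [pvLoopA, PySem.List.index?]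
  | cons v rest ih =>
    by_cases hv : v = 7
    · subst hv
      rw [PySem.List.index?_cons_self]
      simp only [pvLoopA]
      rw [if_pos (by simp)]
      simp only [List.nil_append, List.length_cons, List.length_nil]
      rw [if_neg (by simp)]
      rw [pvLoopA_one]
      simp only [List.drop_succ_cons, List.drop_zero]
      cases PySem.List.index? rest 7 with
      | none => rfl
      | some k =>
        show idx + 1 + (k : Int) - idx = (k : Int) + 1
        ring
    · rw [PySem.List.index?_cons_of_ne rest hv]
      simp only [pvLoopA]
      rw [if_neg (by simp [hv])]
      rw [ih (idx + 1)]
      cases PySem.List.index? rest 7 with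
      | none => rfl
      | some j => simp only [Option.map_some, List.drop_succ_cons]

-- B's loop is a left fold of its step
theorem pvLoopB_eq_foldl (l : List Int) (st : Int × Option Nat) :
    pvLoopB l st = List.foldl pvStepB st l := by
  induction l generalizing st with
  | nil => rfl
  | cons v rest ih => simp [pvLoopB, List.foldl, ih]

-- the backward scan, read as a foldr over the original list:
-- final gap = index of the first 7, final ans = distance between the first two 7s
theorem pvFoldrB_char (nums : List Int) :
    List.foldr (fun x st => pvStepB st x) ((-1 : Int), (none : Option Nat)) nums =
      ((match PySem.List.index? nums 7 with
        | none => (-1 : Int)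
        | some j =>
          match PySem.List.index? (nums.drop (j + 1)) 7 with
          | none => (-1 : Int)
          | some k => (k : Int) + 1),
       PySem.List.index? nums 7) := by
  induction nums with
  | nil => simp [PySem.List.index?, pvStepB]
  | cons v rest ih =>
    rw [List.foldr_cons, ih]
    by_cases hv : v = 7
    · subst hv
      rw [PySem.List.index?_cons_self]
      simp only [List.drop_succ_cons, List.drop_zero]
      cases h : PySem.List.index? rest 7 with
      | none => simp [pvStepB]
      | some k => simp [pvStepB]
    · rw [PySem.List.index?_cons_of_ne rest hv]
      cases h : PySem.List.index? rest 7 with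
      | none => simp [pvStepB, hv]
      | some j =>
        simp only [Option.map_some, List.drop_succ_cons]
        simp [pvStepB, hv]

-- ===== VERDICT =====
theorem get_dist_between_sevens_spec : Claim_equal_get_dist_between_sevens := by
  intro nums _
  unfold Spec_get_dist_between_sevens get_dist_between_sevens get_dist_between_sevens_alt
  rw [pvLoopB_eq_foldl, List.foldl_reverse, pvFoldrB_char, pvLoopA_empty]
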